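-- pv_equiv track=rewrite | github.com/jyrgenn/jpylib | jpylib/numeric.py | sans_outliers
-- ===== SOURCE A (Python) =====
-- def sans_outliers(values):
--     """Return a copy of the values with the highest and lowest value removed.
--
--     If there is more than one highest or lowest value, only one of them is
--     removed.
--
--     """
--     vmax = None
--     vmin = None
--     for value in values:
--         if vmin is None or value < vmin:
--             vmin = value
--         if vmax is None or value > vmax:
--             vmax = value
--     new_values = values.copy()
--     if new_values:
--         new_values.remove(vmin)
--     if new_values:
--         new_values.remove(vmax)
--     return new_values
-- ===== SOURCE B (Python) =====
-- def sans_outliers(values):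
--     """Return a copy of the values with the highest and lowest value removed.
--
--     If there is more than one highest or lowest value, only one of them is
--     removed.
--
--     """
--     if not values:
--         return []
--     imin = imax = 0
--     vmin = vmax = values[0]
--     for i, v in enumerate(values):
--         if v < vmin:
--             imin, vmin = i, v
--         if v > vmax:
--             imax, vmax = i, v
--     if len(values) == 1:
--         return []
--     if imin == imax:
--         # all values are equal: drop the first two
--         return values[2:]
--     if imin < imax:
--         i, j = imin, imax
--     else:
--         i, j = imax, imin
--     return values[:i] + values[i + 1:j] + values[j + 1:]
-- ===== Notes on version B (the rewrite author's own statement) =====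
-- stated objective: alternative
-- what changed: Replaces A's copy-and-list.remove(value) deletions with a single argmin/argmax index pass followed by a three-slice splice (values[:i] + values[i+1:j] + values[j+1:]); no copy mutation or value search remains.
import Mathlib
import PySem

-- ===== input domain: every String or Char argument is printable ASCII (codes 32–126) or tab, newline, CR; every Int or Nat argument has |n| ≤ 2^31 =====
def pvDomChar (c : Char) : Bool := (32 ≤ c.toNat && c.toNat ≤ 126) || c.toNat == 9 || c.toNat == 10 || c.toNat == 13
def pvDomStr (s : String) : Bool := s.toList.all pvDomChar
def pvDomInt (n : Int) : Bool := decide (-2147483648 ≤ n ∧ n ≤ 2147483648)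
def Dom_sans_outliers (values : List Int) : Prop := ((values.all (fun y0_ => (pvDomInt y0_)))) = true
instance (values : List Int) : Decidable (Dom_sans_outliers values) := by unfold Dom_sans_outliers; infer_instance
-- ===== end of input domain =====

-- B replaces A's copy-and-remove(value) deletions with an argmin/argmax index
-- pass plus a three-slice splice (alternative decomposition; same cost).


-- ===== PORT A =====
-- the loop body: update (vmin, vmax) with the next value
def sansStep (p : Option Int × Option Int) (value : Int) : Option Int × Option Int :=
  ((match p.1 with
    | none => some value
    | some vmin => if value < vmin then some value else some vmin),
   (match p.2 with
    | none => some value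
    | some vmax => if value > vmax then some value else some vmax))

def sans_outliers (values : List Int) : List Int :=
  let p := values.foldl sansStep (none, none)
  let new_values := values
  let new_values :=
    if new_values.isEmpty then new_values
    else
      match p.1 with
      | some vmin => (PySem.List.remove? new_values vmin).getD new_values
        -- .getD is a totality guard only: vmin ∈ new_values here, remove? never fails
      | none => new_values
  if new_values.isEmpty then new_values
  else
    match p.2 with
    | some vmax => (PySem.List.remove? new_values vmax).getD new_values
    | none => new_values

-- ===== PORT B =====
-- loop body: update (imin, vmin, imax, vmax) with the next (index, value) pair
def altStep (p : Int × Int × Int × Int) (iv : Int × Int) : Int × Int × Int × Int :=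
  let q1 := if iv.2 < p.2.1 then (iv.1, iv.2) else (p.1, p.2.1)
  let q2 := if iv.2 > p.2.2.2 then (iv.1, iv.2) else (p.2.2.1, p.2.2.2)
  (q1.1, q1.2, q2.1, q2.2)

def sans_outliers_alt (values : List Int) : List Int :=
  match values with
  | [] => []
  | v0 :: _ =>
    let p := (PySem.List.enumerate values 0).foldl altStep (0, v0, 0, v0)
    let imin := p.1
    let imax := p.2.2.1
    if (values.length : Int) == 1 then []
    else if imin == imax then
      -- all values are equal: drop the first two
      PySem.List.slice values (some 2) none
    else
      let ij := if imin < imax then (imin, imax) else (imax, imin)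
      PySem.List.slice values none (some ij.1)
        ++ PySem.List.slice values (some (ij.1 + 1)) (some ij.2)
        ++ PySem.List.slice values (some (ij.2 + 1)) none

-- ===== PRECONDITION & SPEC =====
def Spec_sans_outliers (values : List Int) (out : List Int) : Prop := out = sans_outliers_alt values
instance (values : List Int) (out : List Int) : Decidable (Spec_sans_outliers values out) := by unfold Spec_sans_outliers; infer_instance

-- ===== CLAIM (what is proved, stated in full; the proofs are below) =====
def Claim_equal_sans_outliers : Prop := ∀ (values : List Int), Dom_sans_outliers values → Spec_sans_outliers values (sans_outliers values)

-- ===== LEMMAS AND PROOFS =====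

-- A-side fold characterisation
theorem sansStep_fold (t : List Int) : ∀ (m M : Int),
    t.foldl sansStep (some m, some M) = (some (t.foldl min m), some (t.foldl max M)) := by
  induction t with
  | nil => intro m M; rfl
  | cons x t ih =>
      intro m M
      have hstep : sansStep (some m, some M) x = (some (min m x), some (max M x)) := by
        simp only [sansStep, min_def, max_def]
        split_ifs <;> simp_all <;> omega
      simp [List.foldl, hstep, ih]

-- index of the final (last) strict-min update made by B's loop
def minIdx : List Int → Int → Int → Int → Int
  | [], _, im, _ => im
  | y :: t, s, im, vm => if y < vm then minIdx t (s + 1) s y else minIdx t (s + 1) im vm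

def maxIdx : List Int → Int → Int → Int → Int
  | [], _, iM, _ => iM
  | y :: t, s, iM, vM => if y > vM then maxIdx t (s + 1) s y else maxIdx t (s + 1) iM vM

theorem altStep_fold (t : List Int) : ∀ (s im vm iM vM : Int),
    (PySem.List.enumerate t s).foldl altStep (im, vm, iM, vM) =
      (minIdx t s im vm, t.foldl min vm, maxIdx t s iM vM, t.foldl max vM) := by
  induction t with
  | nil => intro s im vm iM vM; rfl
  | cons y t ih =>
      intro s im vm iM vM
      rw [PySem.List.enumerate_cons]
      have hstep : altStep (im, vm, iM, vM) (s, y) =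
          ((if y < vm then s else im), min vm y, (if y > vM then s else iM), max vM y) := by
        simp only [altStep, min_def, max_def]
        split_ifs <;> simp_all <;> omega
      rw [List.foldl_cons, hstep, ih]
      by_cases h1 : y < vm <;> by_cases h2 : y > vM
      · have e1 : min vm y = y := by omega
        have e2 : max vM y = y := by omega
        simp [minIdx, maxIdx, h1, h2, e1, e2]
      · have e1 : min vm y = y := by omega
        have e2 : max vM y = vM := by omega
        simp [minIdx, maxIdx, h1, h2, e1, e2]
      · have e1 : min vm y = vm := by omega
        have e2 : max vM y = y := by omega
        simp [minIdx, maxIdx, h1, h2, e1, e2]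
      · have e1 : min vm y = vm := by omega
        have e2 : max vM y = vM := by omega
        simp [minIdx, maxIdx, h1, h2, e1, e2]

-- first index of v in l (Nat)
def firstIdx : List Int → Int → Nat
  | [], _ => 0
  | y :: t, v => if y = v then 0 else firstIdx t v + 1

theorem firstIdx_lt {l : List Int} {v : Int} (h : v ∈ l) : firstIdx l v < l.length := by
  induction l with
  | nil => cases h
  | cons y t ih =>
      by_cases hy : y = v
      · simp [firstIdx, hy]
      · have hm : v ∈ t := by cases h with
          | head => exact absurd rfl hy
          | tail _ h => exact h
        simp [firstIdx, hy, Nat.succ_lt_succ (ih hm)]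

theorem getElem_firstIdx {l : List Int} {v : Int} (h : v ∈ l) :
    l[firstIdx l v]'(firstIdx_lt h) = v := by
  induction l with
  | nil => cases h
  | cons y t ih =>
      by_cases hy : y = v
      · simp [firstIdx, hy]
      · have hm : v ∈ t := by cases h with
          | head => exact absurd rfl hy
          | tail _ h => exact h
        simp [firstIdx, hy, ih hm]

theorem ne_of_lt_firstIdx {l : List Int} {v : Int} :
    ∀ (k : Nat), k < firstIdx l v → ∀ (hk : k < l.length), l[k] ≠ v := by
  induction l with
  | nil => intro k _ hk; simp at hk
  | cons y t ih =>
      intro k hlt hk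
      by_cases hy : y = v
      · simp [firstIdx, hy] at hlt
      · cases k with
        | zero => simpa using hy
        | succ k' =>
            simp only [firstIdx, hy, if_false] at hlt
            have := ih k' (by omega) (by simpa using Nat.lt_of_succ_lt_succ hk)
            simpa using this

theorem firstIdx_unique {l : List Int} {v : Int} :
    ∀ (a : Nat) (h : a < l.length), l[a] = v →
      (∀ (k : Nat), k < a → ∀ (hk : k < l.length), l[k] ≠ v) → firstIdx l v = a := by
  induction l with
  | nil => intro a h; simp at h
  | cons y t ih =>
      intro a h hv hb
      by_cases hy : y = v
      · cases a with
        | zero => simp [firstIdx, hy]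
        | succ a' => exact absurd (by simpa using hy) (hb 0 (by omega) (by simp))
      · cases a with
        | zero => exact absurd (by simpa using hv) hy
        | succ a' =>
            have := ih a' (by simpa using Nat.lt_of_succ_lt_succ h) (by simpa using hv)
              (fun k hk hkl => by
                have := hb (k + 1) (by omega) (by simpa using Nat.succ_lt_succ hkl)
                simpa using this)
            simp [firstIdx, hy, this]

theorem erase_firstIdx {l : List Int} {v : Int} (h : v ∈ l) :
    l.erase v = l.eraseIdx (firstIdx l v) := by
  have hidx : List.idxOf? v l = some (firstIdx l v) := by
    rw [List.idxOf?_eq_some_iff]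
    exact ⟨firstIdx_lt h, getElem_firstIdx h, fun j hj => ne_of_lt_firstIdx j hj _⟩
  rw [List.erase_eq_eraseIdx, hidx]

-- min/max fold facts
theorem foldl_min_le_init (t : List Int) : ∀ (a : Int), t.foldl min a ≤ a := by
  induction t with
  | nil => intro a; simp
  | cons y t ih =>
      intro a
      rw [List.foldl_cons]
      exact le_trans (ih (min a y)) (min_le_left _ _)

theorem foldl_min_le_mem (t : List Int) : ∀ (a y : Int), y ∈ t → t.foldl min a ≤ y := by
  induction t with
  | nil => intro a y h; cases h
  | cons z t ih =>
      intro a y h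
      rw [List.foldl_cons]
      cases h with
      | head => exact le_trans (foldl_min_le_init t (min a z)) (min_le_right _ _)
      | tail _ h => exact ih _ y h

theorem foldl_min_mem (t : List Int) : ∀ (a : Int), t.foldl min a ∈ a :: t := by
  induction t with
  | nil => intro a; simp
  | cons y t ih =>
      intro a
      rw [List.foldl_cons]
      rcases List.mem_cons.mp (ih (min a y)) with h | h
      · rcases min_choice a y with hc | hc <;> rw [h, hc]
        · exact List.mem_cons_self
        · exact List.mem_cons_of_mem _ List.mem_cons_self
      · exact List.mem_cons_of_mem _ (List.mem_cons_of_mem _ h)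

theorem init_le_foldl_max (t : List Int) : ∀ (a : Int), a ≤ t.foldl max a := by
  induction t with
  | nil => intro a; simp
  | cons y t ih =>
      intro a
      rw [List.foldl_cons]
      exact le_trans (le_max_left _ _) (ih (max a y))

theorem mem_le_foldl_max (t : List Int) : ∀ (a y : Int), y ∈ t → y ≤ t.foldl max a := by
  induction t with
  | nil => intro a y h; cases h
  | cons z t ih =>
      intro a y h
      rw [List.foldl_cons]
      cases h with
      | head => exact le_trans (le_max_right _ _) (init_le_foldl_max t (max a z))
      | tail _ h => exact ih _ y h

theorem foldl_max_mem (t : List Int) : ∀ (a : Int), t.foldl max a ∈ a :: t := by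
  induction t with
  | nil => intro a; simp
  | cons y t ih =>
      intro a
      rw [List.foldl_cons]
      rcases List.mem_cons.mp (ih (max a y)) with h | h
      · rcases max_choice a y with hc | hc <;> rw [h, hc]
        · exact List.mem_cons_self
        · exact List.mem_cons_of_mem _ List.mem_cons_self
      · exact List.mem_cons_of_mem _ (List.mem_cons_of_mem _ h)

-- closed form of B's argmin / argmax indices
theorem minIdx_eq (t : List Int) : ∀ (s im vm : Int),
    minIdx t s im vm =
      if t.foldl min vm < vm then s + (firstIdx t (t.foldl min vm) : Int) else im := by
  induction t with
  | nil => intro s im vm; simp [minIdx]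
  | cons y t ih =>
      intro s im vm
      have hle : t.foldl min vm ≤ vm := foldl_min_le_init t vm
      by_cases hy : y < vm
      · have hmin : min vm y = y := by omega
        have hm_le : t.foldl min y ≤ y := foldl_min_le_init t y
        simp only [minIdx, if_pos hy, List.foldl_cons, hmin, ih]
        by_cases hlt : t.foldl min y < y
        · have hne : y ≠ t.foldl min y := by omega
          simp [hlt, firstIdx, hne, if_pos (by omega : t.foldl min y < vm)]
          push_cast; ring
        · have heq : t.foldl min y = y := by omega
          simp [hlt, heq, firstIdx, if_pos hy]
      · have hmin : min vm y = vm := by omega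
        simp only [minIdx, if_neg hy, List.foldl_cons, hmin, ih]
        by_cases hlt : t.foldl min vm < vm
        · have hne : y ≠ t.foldl min vm := by omega
          simp [hlt, firstIdx, hne]
          push_cast; ring
        · simp [hlt]

theorem maxIdx_eq (t : List Int) : ∀ (s iM vM : Int),
    maxIdx t s iM vM =
      if vM < t.foldl max vM then s + (firstIdx t (t.foldl max vM) : Int) else iM := by
  induction t with
  | nil => intro s iM vM; simp [maxIdx]
  | cons y t ih =>
      intro s iM vM
      have hle : vM ≤ t.foldl max vM := init_le_foldl_max t vM
      by_cases hy : y > vM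
      · have hmax : max vM y = y := by omega
        have hm_le : y ≤ t.foldl max y := init_le_foldl_max t y
        simp only [maxIdx, if_pos hy, List.foldl_cons, hmax, ih]
        by_cases hlt : y < t.foldl max y
        · have hne : y ≠ t.foldl max y := by omega
          simp [hlt, firstIdx, hne, if_pos (by omega : vM < t.foldl max y)]
          push_cast; ring
        · have heq : t.foldl max y = y := by omega
          simp [hlt, heq, firstIdx, if_pos hy]
      · have hmax : max vM y = vM := by omega
        simp only [maxIdx, if_neg hy, List.foldl_cons, hmax, ih]
        by_cases hlt : vM < t.foldl max vM
        · have hne : y ≠ t.foldl max vM := by omega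
          simp [hlt, firstIdx, hne]
          push_cast; ring
        · simp [hlt]

-- two erases as a three-slice splice
theorem splice_erase_lt {l : List Int} {a b : Nat} (hab : a < b) (hb : b < l.length) :
    (l.eraseIdx b).eraseIdx a =
      l.take a ++ (l.drop (a + 1)).take (b - (a + 1)) ++ l.drop (b + 1) := by
  rw [List.eraseIdx_eq_take_drop_succ l b,
      List.eraseIdx_append_of_lt_length (by simp [List.length_take]; omega) _,
      List.eraseIdx_eq_take_drop_succ, List.take_take, List.drop_take]
  have hmin : min a b = a := by omega
  rw [hmin, List.append_assoc]

theorem splice_erase_gt {l : List Int} {a b : Nat} (hab : a < b) (hb : b < l.length) :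
    (l.eraseIdx a).eraseIdx (b - 1) =
      l.take a ++ (l.drop (a + 1)).take (b - (a + 1)) ++ l.drop (b + 1) := by
  have hta : (List.take a l).length = a := by simp [List.length_take]; omega
  rw [List.eraseIdx_eq_take_drop_succ l a,
      List.eraseIdx_append_of_length_le (by omega) _,
      List.eraseIdx_eq_take_drop_succ, List.drop_drop, hta]
  have h1 : b - 1 - a = b - (a + 1) := by omega
  rw [h1]
  have h2 : a + 1 + (b - (a + 1) + 1) = b + 1 := by omega
  rw [h2, List.append_assoc]

theorem sans_outliers_eq (values : List Int) :
    sans_outliers values = sans_outliers_alt values := by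
  match values with
  | [] => rfl
  | [x] =>
      simp [sans_outliers, sans_outliers_alt, sansStep, PySem.List.enumerate_cons]
  | x :: y :: t' =>
      set m := (y :: t').foldl min x with hm
      set M := (y :: t').foldl max x with hM
      have hfoldA : (x :: y :: t').foldl sansStep (none, none) = (some m, some M) := by
        have h1 : sansStep (none, none) x = (some x, some x) := rfl
        rw [List.foldl_cons, h1, sansStep_fold]
      have hm_mem : m ∈ x :: y :: t' := foldl_min_mem _ _
      have hM_mem : M ∈ x :: y :: t' := foldl_max_mem _ _
      have hmx : m ≤ x := foldl_min_le_init _ _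
      have hxM : x ≤ M := init_le_foldl_max _ _
      have hi_lt : firstIdx (x :: y :: t') m < (x :: y :: t').length := firstIdx_lt hm_mem
      have hj_lt : firstIdx (x :: y :: t') M < (x :: y :: t').length := firstIdx_lt hM_mem
      have hfoldB : (PySem.List.enumerate (x :: y :: t') 0).foldl altStep (0, x, 0, x)
          = ((firstIdx (x :: y :: t') m : Int), m, (firstIdx (x :: y :: t') M : Int), M) := by
        rw [PySem.List.enumerate_cons]
        have h0 : altStep (0, x, 0, x) ((0 : Int), x) = (0, x, 0, x) := by simp [altStep]
        rw [List.foldl_cons, h0, altStep_fold, minIdx_eq, maxIdx_eq, ← hm, ← hM]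
        have himm : (if m < x then 1 + (firstIdx (y :: t') m : Int) else 0)
            = (firstIdx (x :: y :: t') m : Int) := by
          by_cases hc : m < x
          · have hne : x ≠ m := by omega
            simp [hc, firstIdx, hne]; push_cast; ring
          · have heq : x = m := by omega
            simp [firstIdx, heq]
        have hjMM : (if x < M then 1 + (firstIdx (y :: t') M : Int) else 0)
            = (firstIdx (x :: y :: t') M : Int) := by
          by_cases hc : x < M
          · have hne : x ≠ M := by omega
            simp [hc, firstIdx, hne]; push_cast; ring
          · have heq : x = M := by omega
            simp [firstIdx, heq]
        simp only [zero_add]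
        rw [himm, hjMM]
      have hA : sans_outliers (x :: y :: t') =
          (if (x :: y :: t').erase m = [] then (x :: y :: t').erase m
           else (PySem.List.remove? ((x :: y :: t').erase m) M).getD ((x :: y :: t').erase m)) := by
        simp only [sans_outliers, hfoldA]
        simp [PySem.List.remove?_eq_some_erase _ _ hm_mem]
      have hB : sans_outliers_alt (x :: y :: t') =
          (if ((((x :: y :: t').length : Int)) == 1) then ([] : List Int)
           else if ((firstIdx (x :: y :: t') m : Int) == (firstIdx (x :: y :: t') M : Int)) then
             PySem.List.slice (x :: y :: t') (some 2) none
           else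
             (let ij := if (firstIdx (x :: y :: t') m : Int) < (firstIdx (x :: y :: t') M : Int)
                 then ((firstIdx (x :: y :: t') m : Int), (firstIdx (x :: y :: t') M : Int))
                 else ((firstIdx (x :: y :: t') M : Int), (firstIdx (x :: y :: t') m : Int))
              PySem.List.slice (x :: y :: t') none (some ij.1)
                ++ PySem.List.slice (x :: y :: t') (some (ij.1 + 1)) (some ij.2)
                ++ PySem.List.slice (x :: y :: t') (some (ij.2 + 1)) none)) := by
        simp only [sans_outliers_alt, hfoldB]
      have hlen1 : ((((x :: y :: t').length : Int)) == 1) = false := by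
        simp only [List.length_cons]
        rw [beq_eq_false_iff_ne]
        push_cast
        omega
      rw [hA, hB, hlen1]
      simp only [Bool.false_eq_true, if_false]
      by_cases hmM : m = M
      · -- all values are equal: A erases the first two elements; B drops them by slicing
        have hx : x = m := by omega
        have hym : m ≤ y := foldl_min_le_mem _ _ _ List.mem_cons_self
        have hyM : y ≤ M := mem_le_foldl_max _ _ _ List.mem_cons_self
        have hy : y = m := by omega
        have hfi : firstIdx (x :: y :: t') m = 0 := by simp [firstIdx, hx]
        have hfj : firstIdx (x :: y :: t') M = 0 := by simp [firstIdx, hx, hmM]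
        rw [hfi, hfj]
        simp only [beq_self_eq_true, if_true]
        have he1 : (x :: y :: t').erase m = y :: t' := by
          rw [hx]; exact List.erase_cons_head ..
        have he2 : (y :: t').erase M = t' := by
          rw [← hmM, ← hy]; exact List.erase_cons_head ..
        have hM2 : M ∈ y :: t' := by rw [← hmM, ← hy]; exact List.mem_cons_self
        rw [he1, if_neg (List.cons_ne_nil y t')]
        rw [PySem.List.remove?_eq_some_erase _ _ hM2, Option.getD_some, he2]
        have h2c : ((2 : Nat) : Int) = (2 : Int) := by norm_num
        rw [← h2c, PySem.List.slice_from_natCast]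
        simp
      · -- distinct min and max: A's two erases are B's three-slice splice
        have hij_ne : firstIdx (x :: y :: t') m ≠ firstIdx (x :: y :: t') M := by
          intro hEq
          apply hmM
          have h1 := getElem_firstIdx hm_mem
          have h2 := getElem_firstIdx hM_mem
          rw [← h1, ← h2]
          congr 1
        have hbeq : ((firstIdx (x :: y :: t') m : Int) == (firstIdx (x :: y :: t') M : Int)) = false := by
          rw [beq_eq_false_iff_ne]
          intro hEq
          exact hij_ne (by exact_mod_cast hEq)
        rw [hbeq]
        simp only [Bool.false_eq_true, if_false]
        have hera : (x :: y :: t').erase m = (x :: y :: t').eraseIdx (firstIdx (x :: y :: t') m) := erase_firstIdx hm_mem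
        have hnl_len : ((x :: y :: t').eraseIdx (firstIdx (x :: y :: t') m)).length = (y :: t').length := by
          rw [List.length_eraseIdx]
          simp only [hi_lt, if_true]
          simp
        have hnl_ne : (x :: y :: t').eraseIdx (firstIdx (x :: y :: t') m) ≠ [] := by
          intro hc
          rw [hc] at hnl_len
          simp at hnl_len
        rw [hera, if_neg hnl_ne]
        rcases Nat.lt_or_ge (firstIdx (x :: y :: t') M) (firstIdx (x :: y :: t') m) with hji | hge
        · -- j < i : the max sits before the min
          have hjlt' : firstIdx (x :: y :: t') M < ((x :: y :: t').eraseIdx (firstIdx (x :: y :: t') m)).length := by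
            rw [hnl_len]; simp only [List.length_cons] at hi_lt ⊢; omega
          have hgj : ((x :: y :: t').eraseIdx (firstIdx (x :: y :: t') m))[firstIdx (x :: y :: t') M]'hjlt' = M := by
            rw [List.getElem_eraseIdx]
            simp only [hji, dif_pos]
            exact getElem_firstIdx hM_mem
          have hbef : ∀ (k : Nat), k < firstIdx (x :: y :: t') M →
              ∀ (hk : k < ((x :: y :: t').eraseIdx (firstIdx (x :: y :: t') m)).length),
              ((x :: y :: t').eraseIdx (firstIdx (x :: y :: t') m))[k] ≠ M := by
            intro k hkj hk
            rw [List.getElem_eraseIdx]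
            have hki : k < firstIdx (x :: y :: t') m := by omega
            simp only [hki, dif_pos]
            exact ne_of_lt_firstIdx k hkj _
          have hfst := firstIdx_unique _ hjlt' hgj hbef
          have hMnl : M ∈ (x :: y :: t').eraseIdx (firstIdx (x :: y :: t') m) := by
            rw [← hgj]; exact List.getElem_mem _
          rw [PySem.List.remove?_eq_some_erase _ _ hMnl, Option.getD_some, erase_firstIdx hMnl, hfst]
          have hlt_int : ¬ ((firstIdx (x :: y :: t') m : Int) < (firstIdx (x :: y :: t') M : Int)) := by
            push_cast; omega
          rw [if_neg hlt_int]
          have hsp := splice_erase_lt (l := x :: y :: t') hji hi_lt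
          rw [hsp]
          have hc1 : ((firstIdx (x :: y :: t') M : Int)) + 1 = (((firstIdx (x :: y :: t') M + 1 : Nat)) : Int) := by push_cast; ring
          have hc2 : ((firstIdx (x :: y :: t') m : Int)) + 1 = (((firstIdx (x :: y :: t') m + 1 : Nat)) : Int) := by push_cast; ring
          rw [PySem.List.slice_to_natCast, hc1, hc2, PySem.List.slice_natCast, PySem.List.slice_from_natCast]
        · -- i < j : the min sits before the max
          have hij : firstIdx (x :: y :: t') m < firstIdx (x :: y :: t') M := by omega
          have hjlt' : firstIdx (x :: y :: t') M - 1 < ((x :: y :: t').eraseIdx (firstIdx (x :: y :: t') m)).length := by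
            rw [hnl_len]; simp only [List.length_cons] at hj_lt ⊢; omega
          have hgj : ((x :: y :: t').eraseIdx (firstIdx (x :: y :: t') m))[firstIdx (x :: y :: t') M - 1]'hjlt' = M := by
            rw [List.getElem_eraseIdx]
            have hni : ¬ (firstIdx (x :: y :: t') M - 1 < firstIdx (x :: y :: t') m) := by omega
            simp only [hni, dif_neg]
            have harg : firstIdx (x :: y :: t') M - 1 + 1 = firstIdx (x :: y :: t') M := by omega
            simp only [harg]
            exact getElem_firstIdx hM_mem
          have hbef : ∀ (k : Nat), k < firstIdx (x :: y :: t') M - 1 →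
              ∀ (hk : k < ((x :: y :: t').eraseIdx (firstIdx (x :: y :: t') m)).length),
              ((x :: y :: t').eraseIdx (firstIdx (x :: y :: t') m))[k] ≠ M := by
            intro k hkj hk
            rw [List.getElem_eraseIdx]
            by_cases hki : k < firstIdx (x :: y :: t') m
            · simp only [hki, dif_pos]
              exact ne_of_lt_firstIdx k (by omega) _
            · simp only [hki, dif_neg]
              exact ne_of_lt_firstIdx (k + 1) (by omega) _
          have hfst := firstIdx_unique _ hjlt' hgj hbef
          have hMnl : M ∈ (x :: y :: t').eraseIdx (firstIdx (x :: y :: t') m) := by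
            rw [← hgj]; exact List.getElem_mem _
          rw [PySem.List.remove?_eq_some_erase _ _ hMnl, Option.getD_some, erase_firstIdx hMnl, hfst]
          have hlt_int : ((firstIdx (x :: y :: t') m : Int) < (firstIdx (x :: y :: t') M : Int)) := by
            push_cast; omega
          rw [if_pos hlt_int]
          have hsp := splice_erase_gt (l := x :: y :: t') hij hj_lt
          rw [hsp]
          have hc1 : ((firstIdx (x :: y :: t') m : Int)) + 1 = (((firstIdx (x :: y :: t') m + 1 : Nat)) : Int) := by push_cast; ring
          have hc2 : ((firstIdx (x :: y :: t') M : Int)) + 1 = (((firstIdx (x :: y :: t') M + 1 : Nat)) : Int) := by push_cast; ring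
          rw [PySem.List.slice_to_natCast, hc1, hc2, PySem.List.slice_natCast, PySem.List.slice_from_natCast]

-- ===== VERDICT (by name: the statement is the Claim_ definition above) =====
theorem sans_outliers_spec : Claim_equal_sans_outliers := by
  intro values _
  exact sans_outliers_eq values
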